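-- pv_equiv track=rewrite | github.com/varungaddalay-github/daily-engineering-workout | problems/2025_12_04.py | first_violation_per_user_optimal
-- ===== SOURCE A (Python) =====
-- def first_violation_per_user_optimal(events):
--     res = {}
--
--     for ts, user_id, _ in events:
--         if user_id not in res:
--             res[user_id] = ts
--         else:
--             if ts < res[user_id]:
--                 res[user_id] = ts
--     return res
-- ===== SOURCE B (Python) =====
-- def first_violation_per_user_optimal(events):
--     groups = {}
--     for ts, user_id, _ in events:
--         groups.setdefault(user_id, []).append(ts)
--     return {user_id: min(ts_list) for user_id, ts_list in groups.items()}
-- ===== Notes on version B (the rewrite author's own statement) =====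
-- stated objective: alternative
-- what changed: Instead of keeping a running minimum per user during the single scan, B first groups all timestamps into per-user lists (setdefault/append) and then reduces each list with min in a separate comprehension pass; key order (first appearance) and values are identical.
import Mathlib
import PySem

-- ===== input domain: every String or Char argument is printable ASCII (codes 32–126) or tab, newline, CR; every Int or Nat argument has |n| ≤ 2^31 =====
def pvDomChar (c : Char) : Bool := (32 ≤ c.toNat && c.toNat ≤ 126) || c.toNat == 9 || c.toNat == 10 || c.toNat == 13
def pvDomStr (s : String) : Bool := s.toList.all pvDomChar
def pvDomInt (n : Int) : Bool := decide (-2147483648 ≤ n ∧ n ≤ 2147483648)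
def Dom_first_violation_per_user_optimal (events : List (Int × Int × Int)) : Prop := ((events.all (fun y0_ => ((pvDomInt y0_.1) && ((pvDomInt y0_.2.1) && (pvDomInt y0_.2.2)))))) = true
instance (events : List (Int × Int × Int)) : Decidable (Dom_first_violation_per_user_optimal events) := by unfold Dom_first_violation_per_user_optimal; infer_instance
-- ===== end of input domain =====

-- B groups all timestamps into per-user lists, then takes min of each list in a second pass,
-- instead of A's single scan with a running per-user minimum; same cost, alternative decomposition.

-- ===== PORT A =====
-- one loop iteration of A: running minimum per user in dict res
def pvAStep (res : PySem.Dict Int Int) (e : Int × Int × Int) : PySem.Dict Int Int :=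
  if res.contains e.2.1 = false then res.insert e.2.1 e.1
  else if e.1 < res.getD e.2.1 0 then res.insert e.2.1 e.1
  else res

def first_violation_per_user_optimal (events : List (Int × Int × Int)) : List (Int × Int) :=
  (events.foldl pvAStep PySem.Dict.empty).items

-- ===== PORT B =====
-- groups.setdefault(user_id, []).append(ts)  ==  d[u] = d.get(u, []) + [ts]
def pvBGroup (d : PySem.Dict Int (List Int)) (e : Int × Int × Int) : PySem.Dict Int (List Int) :=
  d.modify e.2.1 [] (fun l => l ++ [e.1])

def first_violation_per_user_optimal_alt (events : List (Int × Int × Int)) : List (Int × Int) :=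
  ((events.foldl pvBGroup PySem.Dict.empty).items).map
    (fun p => (p.1, (PySem.List.min? p.2 (fun y => y)).getD 0))
    -- min(ts_list); every grouped list is nonempty, so the getD default is never used

-- ===== PRECONDITION & SPEC =====
def Spec_first_violation_per_user_optimal (events : List (Int × Int × Int)) (out : List (Int × Int)) : Prop := out = first_violation_per_user_optimal_alt events
instance (events : List (Int × Int × Int)) (out : List (Int × Int)) : Decidable (Spec_first_violation_per_user_optimal events out) := by unfold Spec_first_violation_per_user_optimal; infer_instance

-- ===== CLAIM (what is proved, stated in full; the proofs are below) =====
def Claim_equal_first_violation_per_user_optimal : Prop := ∀ (events : List (Int × Int × Int)), Dom_first_violation_per_user_optimal events → Spec_first_violation_per_user_optimal events (first_violation_per_user_optimal events)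

-- ===== LEMMAS AND PROOFS =====

-- running minimum, as A maintains it per key
def pvRunMin : Option Int → List Int → Option Int
  | o, [] => o
  | none, t :: ts => pvRunMin (some t) ts
  | some c, t :: ts => pvRunMin (some (if t < c then t else c)) ts

theorem pvRunMin_some (ts : List Int) (c : Int) : pvRunMin (some c) ts = some (ts.foldl min c) := by
  induction ts generalizing c with
  | nil => rfl
  | cons t ts ih =>
      have h : (if t < c then t else c) = min c t := by rw [min_def]; split_ifs <;> omega
      simp only [pvRunMin, List.foldl_cons, ih, h]

-- inserting the value a key already holds does not change the dict
theorem pvInsert_existing (d : PySem.Dict Int Int) (k v : Int)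
    (hnd : d.keys.Nodup) (h : d.get? k = some v) : d.insert k v = d := by
  apply PySem.Dict.ext
  rw [PySem.Dict.items_insert_of_contains _ _
        (by rw [PySem.Dict.contains_eq_isSome_get?, h]; rfl)]
  rw [List.map_congr_left (g := id) ?_, List.map_id]
  intro p hp
  by_cases hk : p.1 = k
  · have := PySem.Dict.get?_of_mem_items d (k := p.1) (v := p.2) (by simpa using hp) hnd
    rw [hk, h] at this
    simp only [hk, beq_self_eq_true, if_pos, id]
    obtain ⟨p1, p2⟩ := p
    simp_all
  · simp [hk]

-- A's running-min value for one event
def pvAVal (d : PySem.Dict Int Int) (e : Int × Int × Int) : Int :=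
  ((d.get? e.2.1).map (fun cur => if e.1 < cur then e.1 else cur)).getD e.1

theorem pvAStep_eq_insert (d : PySem.Dict Int Int) (e : Int × Int × Int)
    (hnd : d.keys.Nodup) : pvAStep d e = d.insert e.2.1 (pvAVal d e) := by
  unfold pvAStep pvAVal
  rcases hres : d.get? e.2.1 with _ | cur
  · rw [if_pos (by rw [PySem.Dict.contains_eq_isSome_get?, hres]; rfl)]
    rfl
  · rw [if_neg (by rw [PySem.Dict.contains_eq_isSome_get?, hres]; simp),
        PySem.Dict.getD_of_get?_eq_some d 0 hres]
    simp only [Option.map_some, Option.getD_some]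
    split_ifs with hlt
    · rfl
    · exact (pvInsert_existing d e.2.1 cur hnd hres).symm

-- A's whole loop, rewritten as an unconditional insert-fold (needs nodup keys)
theorem pvAfold_eq_insertfold (events : List (Int × Int × Int)) (d : PySem.Dict Int Int)
    (hnd : d.keys.Nodup) :
    events.foldl pvAStep d = events.foldl (fun d e => d.insert e.2.1 (pvAVal d e)) d := by
  induction events generalizing d with
  | nil => rfl
  | cons e es ih =>
      simp only [List.foldl_cons, pvAStep_eq_insert d e hnd]
      exact ih _ (PySem.Dict.nodup_keys_insert _ _ _ hnd)

theorem pvAfold_nodup (events : List (Int × Int × Int)) :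
    (events.foldl pvAStep PySem.Dict.empty).keys.Nodup := by
  rw [pvAfold_eq_insertfold events _ PySem.Dict.nodup_keys_empty]
  exact PySem.Dict.nodup_keys_foldl_insert_key events (·.2.1) pvAVal _ PySem.Dict.nodup_keys_empty

theorem pvAfold_keys (events : List (Int × Int × Int)) :
    (events.foldl pvAStep PySem.Dict.empty).keys
      = PySem.Set.ofList (events.map (·.2.1)) := by
  rw [pvAfold_eq_insertfold events _ PySem.Dict.nodup_keys_empty,
      PySem.Dict.keys_foldl_insert_key events (·.2.1) pvAVal, PySem.Dict.keys_empty,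
      PySem.Set.ofList_eq_foldl]
  rfl

-- what A's loop computes at each key
theorem pvAfold_get? (events : List (Int × Int × Int)) (res : PySem.Dict Int Int) (k : Int) :
    (events.foldl pvAStep res).get? k
      = pvRunMin (res.get? k) ((events.filter (fun e => e.2.1 == k)).map (·.1)) := by
  induction events generalizing res with
  | nil => rfl
  | cons e es ih =>
      simp only [List.foldl_cons, List.filter_cons]
      by_cases hk : e.2.1 = k
      · subst hk
        simp only [beq_self_eq_true, if_pos, List.map_cons, ih]
        unfold pvAStep
        rcases hres : res.get? e.2.1 with _ | cur
        · rw [if_pos (by rw [PySem.Dict.contains_eq_isSome_get?, hres]; rfl)]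
          simp [PySem.Dict.get?_insert_self, pvRunMin]
        · rw [if_neg (by rw [PySem.Dict.contains_eq_isSome_get?, hres]; simp),
              PySem.Dict.getD_of_get?_eq_some res 0 hres]
          simp only [pvRunMin]
          split_ifs with hlt
          · simp [PySem.Dict.get?_insert_self]
          · simp [hres]
      · have hne : (e.2.1 == k) = false := by simp [hk]
        simp only [hne, Bool.false_eq_true, if_neg, not_false_iff, ih]
        congr 1
        unfold pvAStep
        split_ifs <;> first
          | exact PySem.Dict.get?_insert_of_ne _ _ (fun h => hk h.symm)
          | rfl

-- what B's grouping loop collects at each key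
theorem pvBfold_getD (events : List (Int × Int × Int)) (k : Int) :
    (events.foldl pvBGroup PySem.Dict.empty).getD k []
      = (events.filter (fun e => e.2.1 == k)).map (·.1) := by
  have : events.foldl pvBGroup PySem.Dict.empty
      = (events.map (fun e => (e.2.1, e.1))).foldl
          (fun d p => d.modify p.1 [] (fun l => l ++ [p.2])) PySem.Dict.empty := by
    rw [List.foldl_map]; rfl
  rw [this, PySem.Dict.getD_foldl_modify_append, PySem.Dict.getD_empty]
  simp only [List.nil_append, List.filter_map, List.map_map]
  rfl

theorem pvBfold_nodup (events : List (Int × Int × Int)) :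
    (events.foldl pvBGroup PySem.Dict.empty).keys.Nodup := by
  exact PySem.Dict.nodup_keys_foldl_modify_key events (·.2.1) []
    (fun _ e => (fun l => l ++ [e.1])) _ PySem.Dict.nodup_keys_empty

theorem pvBfold_keys (events : List (Int × Int × Int)) :
    (events.foldl pvBGroup PySem.Dict.empty).keys
      = PySem.Set.ofList (events.map (·.2.1)) := by
  have hfold : events.foldl pvBGroup PySem.Dict.empty
      = events.foldl (fun d e =>
          d.modify e.2.1 [] ((fun _ (e : Int × Int × Int) => (fun l => l ++ [e.1])) d e))
          PySem.Dict.empty := rfl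
  rw [hfold, PySem.Dict.keys_foldl_modify_key events (·.2.1) [], PySem.Dict.keys_empty,
      PySem.Set.ofList_eq_foldl]
  rfl

-- ===== VERDICT (by name: the statement is the Claim_ definition above) =====
theorem first_violation_per_user_optimal_spec : Claim_equal_first_violation_per_user_optimal := by
  intro events _
  unfold Spec_first_violation_per_user_optimal
  unfold first_violation_per_user_optimal first_violation_per_user_optimal_alt
  rw [PySem.Dict.items_eq_map_keys _ (pvAfold_nodup events) 0,
      PySem.Dict.items_eq_map_keys _ (pvBfold_nodup events) [],
      List.map_map, pvAfold_keys, pvBfold_keys]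
  apply List.map_congr_left
  intro k hk
  rw [PySem.Set.mem_ofList] at hk
  obtain ⟨e, he, hke⟩ := List.mem_map.mp hk
  have hfil : e ∈ events.filter (fun e => e.2.1 == k) :=
    List.mem_filter.mpr ⟨he, by simp [hke]⟩
  rcases hl : (events.filter (fun e => e.2.1 == k)).map (·.1) with _ | ⟨x, t⟩
  · have hx := List.mem_map_of_mem (f := fun x : Int × Int × Int => x.1) hfil
    simp only [hl] at hx
    cases hx
  · simp only [Function.comp]
    rw [PySem.Dict.getD_eq_get?_getD, pvAfold_get?, PySem.Dict.get?_empty, hl,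
        pvBfold_getD, hl]
    simp [pvRunMin, pvRunMin_some, PySem.List.min?_id_cons]
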